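-- pv_equiv track=rewrite | github.com/barnecle/CPS-Control | Lab2/cursesGraph.py | getRobotPosition
-- ===== SOURCE A (Python) =====
-- def getRobotPosition(array):
--    retString = ""
--    index = array.index(max(array))
--    for i in range(len(array)):
--       if i == index:
--          retString += "O"
--       else:
--          retString += "_"
--    return retString
-- ===== SOURCE B (Python) =====
-- def getRobotPosition(array):
--    index = array.index(max(array))
--    return "_" * index + "O" + "_" * (len(array) - index - 1)
-- ===== Notes on version B (the rewrite author's own statement) =====
-- stated objective: simpler
-- what changed: Replaces the per-index loop with an if-branch by a closed-form string built from the max's index via string multiplication and concatenation.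
import Mathlib
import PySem

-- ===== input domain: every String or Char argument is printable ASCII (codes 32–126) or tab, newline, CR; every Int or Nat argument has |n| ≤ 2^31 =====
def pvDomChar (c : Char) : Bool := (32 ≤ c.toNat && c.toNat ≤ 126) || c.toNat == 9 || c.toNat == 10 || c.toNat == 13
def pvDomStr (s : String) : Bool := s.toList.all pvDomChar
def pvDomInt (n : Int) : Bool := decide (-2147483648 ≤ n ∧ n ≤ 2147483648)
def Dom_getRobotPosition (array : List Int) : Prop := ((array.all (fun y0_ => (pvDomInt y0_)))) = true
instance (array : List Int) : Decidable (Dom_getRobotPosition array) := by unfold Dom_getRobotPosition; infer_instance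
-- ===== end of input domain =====

-- B builds the answer in closed form ("_"*index + "O" + "_"*rest) instead of A's per-index loop; objective: simpler.

-- ===== PORT A =====
-- A: index = array.index(max(array)); then loop over range(len(array)) appending "O" or "_".
def getRobotPosition (array : List Int) : String :=
  match PySem.List.max? array (fun x => x) with
  | none => ""          -- Python raises ValueError on an empty list: excluded by Pre_
  | some m =>
    match PySem.List.index? array m with
    | none => ""        -- unreachable: the max is a member
    | some index =>
      (PySem.List.pyRange 0 (PySem.List.len array) 1).foldl
        (fun retString i => retString ++ (if i == (index : Int) then "O" else "_")) ""

-- ===== PORT B =====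
-- B: same index computation, then the closed-form string.
def getRobotPosition_alt (array : List Int) : String :=
  match PySem.List.max? array (fun x => x) with
  | none => ""          -- Python raises ValueError on an empty list: excluded by Pre_
  | some m =>
    match PySem.List.index? array m with
    | none => ""        -- unreachable: the max is a member
    | some index =>
      String.ofList (List.replicate index '_') ++ "O"
        ++ String.ofList (List.replicate (array.length - index - 1) '_')

-- ===== PRECONDITION & SPEC =====
-- Pre_ excludes only the empty list, on which Python's max() raises ValueError.
def Pre_getRobotPosition (array : List Int) : Prop := array ≠ []
instance (array : List Int) : Decidable (Pre_getRobotPosition array) := by unfold Pre_getRobotPosition; infer_instance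
def pvWitness_getRobotPosition : List Int := [1, 3, 2]

def Spec_getRobotPosition (array : List Int) (out : String) : Prop := out = getRobotPosition_alt array
instance (array : List Int) (out : String) : Decidable (Spec_getRobotPosition array out) := by unfold Spec_getRobotPosition; infer_instance

-- ===== CLAIM (what is proved, stated in full; the proofs are below) =====
def Claim_equal_getRobotPosition : Prop := ∀ (array : List Int), Dom_getRobotPosition array → Pre_getRobotPosition array → Spec_getRobotPosition array (getRobotPosition array)

-- ===== LEMMAS AND PROOFS =====

-- Folding the append loop over indices all different from k just appends underscores.
lemma fold_all_ne (k : Int) (l : List Int) (a : String) (h : ∀ i ∈ l, i ≠ k) :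
    l.foldl (fun s i => s ++ (if i == k then "O" else "_")) a
      = a ++ String.ofList (List.replicate l.length '_') := by
  induction l generalizing a with
  | nil => simp
  | cons x t ih =>
    have hx : (x == k) = false := by
      simp only [beq_eq_false_iff_ne]; exact h x (by simp)
    simp only [List.foldl_cons, hx]
    rw [ih _ (fun i hi => h i (by simp [hi]))]
    apply String.toList_inj.mp
    simp [List.replicate_succ]

theorem getRobotPosition_spec : Claim_equal_getRobotPosition := by
  intro array _ hpre
  unfold Spec_getRobotPosition getRobotPosition getRobotPosition_alt
  obtain ⟨m, hm⟩ : ∃ m, PySem.List.max? array (fun x => x) = some m := by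
    cases hmax : PySem.List.max? array (fun x => x) with
    | none => exact absurd ((PySem.List.max?_eq_none_iff array _).mp hmax) hpre
    | some m => exact ⟨m, rfl⟩
  obtain ⟨k, hk⟩ : ∃ k, PySem.List.index? array m = some k := by
    have : m ∈ array := PySem.List.max?_mem hm
    rcases Option.isSome_iff_exists.mp ((PySem.List.index?_isSome_iff array m).mpr this) with ⟨k, hk⟩
    exact ⟨k, hk⟩
  simp only [hm, hk]
  -- k < array.length
  obtain ⟨hklt, -, -⟩ := PySem.List.getElem_of_index?_eq_some hk
  -- split the range at k and k+1
  have hlen : PySem.List.len array = (array.length : Int) := PySem.List.len_eq array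
  have hsplit : PySem.List.pyRange 0 (PySem.List.len array) 1
      = PySem.List.pyRange 0 (k : Int) 1 ++ (k : Int) :: PySem.List.pyRange ((k : Int) + 1) ((array.length : Int)) 1 := by
    rw [hlen, PySem.List.pyRange_one_append 0 (k : Int) (array.length : Int)
        (by exact_mod_cast Nat.zero_le k) (by exact_mod_cast hklt.le),
      PySem.List.pyRange_one_cons (a := (k : Int)) (b := (array.length : Int)) (by exact_mod_cast hklt)]
  rw [hsplit, List.foldl_append, List.foldl_cons]
  rw [fold_all_ne (k : Int) _ _ (fun i hi => by
    have := PySem.List.mem_pyRange_one.mp hi; omega)]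
  rw [fold_all_ne (k : Int) _ _ (fun i hi => by
    have := PySem.List.mem_pyRange_one.mp hi; omega)]
  have h1 : (PySem.List.pyRange 0 (k : Int) 1).length = k := by
    simp [PySem.List.length_pyRange_one]
  have h2 : (PySem.List.pyRange ((k : Int) + 1) ((array.length : Int)) 1).length
      = array.length - k - 1 := by
    rw [PySem.List.length_pyRange_one]; omega
  simp [h1, h2, String.append_assoc]

-- ===== VERDICT (by name: the statement is the Claim_ definition above) =====
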